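-- pv_equiv track=rewrite | github.com/NadiaCorrea/RecuperacionPython | ejerciciosRecuperacion/Ejer15NumCaracteres.py | contarCaracteres
-- ===== SOURCE A (Python) =====
-- def contarCaracteres(cadena, caracter):
--     posiciones = []
--     i = 0
--
--     while i < len(cadena):
--         if cadena[i] == caracter:
--             posiciones.append(i) #guardo todos los que encuentre
--         i = i + 1
--
--     if len(posiciones) <= 1:
--         result = -1
--     else:
--         result = posiciones[len(posiciones) -1 ] - posiciones[0]
--
--     return result
-- ===== SOURCE B (Python) =====
-- def contarCaracteres(cadena, caracter):
--     primero = -1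
--     for i in range(len(cadena)):
--         if cadena[i] == caracter:
--             primero = i
--             break
--     if primero == -1:
--         return -1
--     ultimo = -1
--     for i in range(len(cadena) - 1, -1, -1):
--         if cadena[i] == caracter:
--             ultimo = i
--             break
--     if ultimo == primero:
--         return -1
--     return ultimo - primero
-- ===== Notes on version B (the rewrite author's own statement) =====
-- stated objective: faster
-- what changed: B replaces A's collect-all-positions list with two early-exit scalar scans: a forward loop that breaks at the first occurrence and a backward loop that breaks at the last, returning last - first (or -1 when there are fewer than two occurrences).
import Mathlib
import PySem

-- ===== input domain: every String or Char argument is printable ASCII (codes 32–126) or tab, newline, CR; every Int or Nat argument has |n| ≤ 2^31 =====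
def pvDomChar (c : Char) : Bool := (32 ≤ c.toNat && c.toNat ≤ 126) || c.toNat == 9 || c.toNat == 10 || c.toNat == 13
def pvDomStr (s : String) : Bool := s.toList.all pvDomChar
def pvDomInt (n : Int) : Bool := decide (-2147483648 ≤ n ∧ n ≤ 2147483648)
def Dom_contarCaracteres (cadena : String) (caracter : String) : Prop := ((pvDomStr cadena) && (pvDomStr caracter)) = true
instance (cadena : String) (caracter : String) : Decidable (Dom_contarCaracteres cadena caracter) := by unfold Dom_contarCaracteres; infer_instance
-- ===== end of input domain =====

-- B replaces A's collect-all-positions list with two early-exit scalar scans (first forward, last backward): no position list, loops break at the first hit.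

-- ===== PORT A =====
-- A's while loop collecting every index i with cadena[i] == caracter
def pvALoop (caracter : String) : List Char → Int → List Int
  | [], _ => []
  | c :: rest, i =>
    if String.ofList [c] = caracter then i :: pvALoop caracter rest (i + 1)
    else pvALoop caracter rest (i + 1)

def contarCaracteres (cadena : String) (caracter : String) : Int :=
  let posiciones := pvALoop caracter cadena.toList 0
  if posiciones.length ≤ 1 then -1
  else posiciones.getLastD 0 - posiciones.headD 0

-- ===== PORT B =====
-- forward scan, break at first match (sentinel -1 when no match)
def pvFirstLoop (caracter : String) : List Char → Int → Int
  | [], _ => -1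
  | c :: rest, i =>
    if String.ofList [c] = caracter then i else pvFirstLoop caracter rest (i + 1)

-- backward scan over the reversed characters with a decreasing index, break at first match
def pvLastLoop (caracter : String) : List Char → Int → Int
  | [], _ => -1
  | c :: rest, i =>
    if String.ofList [c] = caracter then i else pvLastLoop caracter rest (i - 1)

def contarCaracteres_alt (cadena : String) (caracter : String) : Int :=
  let cs := cadena.toList
  let primero := pvFirstLoop caracter cs 0
  if primero = -1 then -1
  else
    let ultimo := pvLastLoop caracter cs.reverse ((cs.length : Int) - 1)
    if ultimo = primero then -1 else ultimo - primero

-- ===== PRECONDITION & SPEC =====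
def Spec_contarCaracteres (cadena : String) (caracter : String) (out : Int) : Prop := out = contarCaracteres_alt cadena caracter
instance (cadena : String) (caracter : String) (out : Int) : Decidable (Spec_contarCaracteres cadena caracter out) := by unfold Spec_contarCaracteres; infer_instance

-- ===== CLAIM (what is proved, stated in full; the proofs are below) =====
def Claim_equal_contarCaracteres : Prop := ∀ (cadena : String) (caracter : String), Dom_contarCaracteres cadena caracter → Spec_contarCaracteres cadena caracter (contarCaracteres cadena caracter)

-- ===== LEMMAS AND PROOFS =====

theorem pvALoop_mem_le (caracter : String) :
    ∀ (cs : List Char) (i x : Int), x ∈ pvALoop caracter cs i → i ≤ x := by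
  intro cs
  induction cs with
  | nil => intro i x h; simp [pvALoop] at h
  | cons c rest ih =>
    intro i x h
    simp only [pvALoop] at h
    split at h
    · rcases List.mem_cons.1 h with h | h
      · omega
      · have := ih (i + 1) x h; omega
    · have := ih (i + 1) x h; omega

theorem pvALoop_head_lt (caracter : String) :
    ∀ (cs : List Char) (i x : Int) (rest : List Int),
      pvALoop caracter cs i = x :: rest → ∀ y ∈ rest, x < y := by
  intro cs
  induction cs with
  | nil => intro i x rest h; simp [pvALoop] at h
  | cons c tl ih =>
    intro i x rest h y hy
    simp only [pvALoop] at h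
    split at h
    · injection h with h1 h2
      subst h1
      rw [← h2] at hy
      have := pvALoop_mem_le caracter tl (i + 1) y hy
      omega
    · exact ih (i + 1) x rest h y hy

theorem pvFirstLoop_eq (caracter : String) :
    ∀ (cs : List Char) (i : Int),
      pvFirstLoop caracter cs i = (pvALoop caracter cs i).headD (-1) := by
  intro cs
  induction cs with
  | nil => intro i; simp [pvFirstLoop, pvALoop]
  | cons c rest ih =>
    intro i
    simp only [pvFirstLoop, pvALoop]
    split
    · rfl
    · exact ih (i + 1)

theorem pvALoop_append (caracter : String) :
    ∀ (cs : List Char) (c : Char) (i : Int),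
      pvALoop caracter (cs ++ [c]) i =
        pvALoop caracter cs i ++
          (if String.ofList [c] = caracter then [i + cs.length] else []) := by
  intro cs
  induction cs with
  | nil => intro c i; simp [pvALoop]
  | cons d rest ih =>
    intro c i
    simp only [List.cons_append, pvALoop, ih c (i + 1), List.length_cons]
    split <;> split <;> simp <;> ring_nf
  
theorem pvLastLoop_eq (caracter : String) :
    ∀ (cs : List Char) (i : Int),
      pvLastLoop caracter cs.reverse (i + cs.length - 1) =
        (pvALoop caracter cs i).getLastD (-1) := by
  intro cs
  induction cs using List.reverseRecOn with
  | nil => intro i; simp [pvLastLoop, pvALoop]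
  | append_singleton ds c ih =>
    intro i
    rw [List.reverse_append, List.reverse_singleton, List.singleton_append,
        pvALoop_append]
    simp only [List.length_append, List.length_singleton, pvLastLoop]
    split
    · next h =>
      simp
      ring
    · next h =>
      simp
      have : (i + (↑ds.length + 1) - 1) - 1 = i + ↑ds.length - 1 := by ring
      rw [this]
      simpa [List.getLastD_eq_getLast?] using ih i

theorem pvGetLastD_mem : ∀ (l : List Int) (a : Int), l.getLastD a ∈ a :: l := by
  intro l
  induction l with
  | nil => intro a; simp
  | cons b l ih =>
    intro a
    rw [List.getLastD_cons]
    exact List.mem_cons_of_mem a (ih b)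

-- ===== VERDICT (by name: the statement is the Claim_ definition above) =====
theorem contarCaracteres_spec : Claim_equal_contarCaracteres := by
  intro cadena caracter _
  unfold Spec_contarCaracteres contarCaracteres contarCaracteres_alt
  simp only
  have hlast := pvLastLoop_eq caracter cadena.toList 0
  rw [zero_add] at hlast
  rw [pvFirstLoop_eq, hlast]
  cases h : pvALoop caracter cadena.toList 0 with
  | nil => simp
  | cons x rest =>
    have hx0 : 0 ≤ x := pvALoop_mem_le caracter cadena.toList 0 x (h ▸ List.mem_cons_self ..)
    cases rest with
    | nil => simp
    | cons y tl =>
      have hlt : x < tl.getLastD y := by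
        have hmem : tl.getLastD y ∈ y :: tl := pvGetLastD_mem tl y
        exact pvALoop_head_lt caracter cadena.toList 0 x (y :: tl) h _ hmem
      simp only [List.length_cons, List.headD_cons, List.getLastD_cons]
      rw [if_neg (by simp), if_neg (by omega), if_neg (by omega)]
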